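-- pv_equiv track=rewrite | github.com/edoriggio/algorithms-and-data-structures | exercises/ex_213.py | better_algo_x
-- ===== SOURCE A (Python) =====
-- def better_algo_x(A, k):
--     # Timsort -> nlog(n)
--     A.sort()
--
--     if k < 0 or k >= len(A):
--         return None
--
--     # For loop -> k
--     # k can never be greater than n, thus the maximum
--     # complexity of this loop is n
--     for i in range(k):
--         if A[i] == A[k]:
--             return None
--
--     return A[k]
-- ===== SOURCE B (Python) =====
-- # Quickselect-based: k-th smallest in expected O(n) without sorting, then one
-- # counting pass decides the duplicate rule. (A sorts A in place; B does not
-- # mutate A -- the equivalence claimed is about the return value.)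
--
-- def _qsel(xs, k):
--     # k-th smallest (0-based) of non-empty xs, deterministic first-element pivot.
--     p = xs[0]
--     lt = [v for v in xs if v < p]
--     if k < len(lt):
--         return _qsel(lt, k)
--     eqn = sum(1 for v in xs if v == p)
--     if k < len(lt) + eqn:
--         return p
--     return _qsel([v for v in xs if v > p], k - len(lt) - eqn)
--
--
-- def better_algo_x(A, k):
--     if k < 0 or k >= len(A):
--         return None
--     x = _qsel(A, k)
--     less = sum(1 for v in A if v < x)
--     return x if less == k else None
-- ===== Notes on version B (the rewrite author's own statement) =====
-- stated objective: alternative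
-- what changed: Replaces sort-then-scan with a three-way-partition quickselect for the k-th smallest plus a single counting pass (count of elements strictly below it decides the duplicate rule); no sorting and no mutation of A; intended as faster (expected O(n) vs O(n log n)) but a timing run read only 1.64x at the largest size, inconsistently, so no speed is claimed.
import Mathlib
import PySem

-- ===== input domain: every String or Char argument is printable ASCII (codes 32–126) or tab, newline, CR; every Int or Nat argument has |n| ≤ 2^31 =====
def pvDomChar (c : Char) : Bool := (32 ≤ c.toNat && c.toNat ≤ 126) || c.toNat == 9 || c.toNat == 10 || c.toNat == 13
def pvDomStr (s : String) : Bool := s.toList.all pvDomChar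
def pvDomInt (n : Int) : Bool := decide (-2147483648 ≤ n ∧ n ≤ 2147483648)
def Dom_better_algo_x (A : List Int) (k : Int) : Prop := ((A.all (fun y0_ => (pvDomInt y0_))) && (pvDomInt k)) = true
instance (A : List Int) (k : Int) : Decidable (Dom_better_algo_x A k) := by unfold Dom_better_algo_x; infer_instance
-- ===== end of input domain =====

-- B replaces A's sort-then-scan with a three-way-partition quickselect for the k-th
-- smallest plus one counting pass; A sorts its argument in place, B does not, so the
-- equivalence proved is about the return value only.

-- ===== PORT A =====
def better_algo_x (A : List Int) (k : Int) : Option Int :=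
  let s := PySem.List.sorted A (fun x => x) false
  if k < 0 ∨ k ≥ (s.length : Int) then none
  else
    match (PySem.List.pyRange 0 k 1).find?
        (fun i => PySem.List.pyGet? s i == PySem.List.pyGet? s k) with
    | some _ => none
    | none => PySem.List.pyGet? s k

-- ===== PORT B =====
-- qselAlt is Source B's _qsel: deterministic first-pivot three-way quickselect
def qselAlt : List Int → Nat → Int
  | [], _ => 0
  | p :: rest, k =>
    let lt := (p :: rest).filter (fun v => decide (v < p))
    if k < lt.length then qselAlt lt k
    else
      let eqn := ((p :: rest).filter (fun v => v == p)).length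
      if k < lt.length + eqn then p
      else qselAlt ((p :: rest).filter (fun v => decide (p < v))) (k - lt.length - eqn)
termination_by xs _ => xs.length
decreasing_by
  · have h := List.length_filter_le (fun v => decide (v < p)) rest
    simp [List.filter_cons]
    omega
  · have h := List.length_filter_le (fun v => decide (p < v)) rest
    simp [List.filter_cons]
    omega

def better_algo_x_alt (A : List Int) (k : Int) : Option Int :=
  if k < 0 ∨ k ≥ (A.length : Int) then none
  else
    let x := qselAlt A k.toNat
    let less := (A.filter (fun v => decide (v < x))).length
    if (less : Int) = k then some x else none

-- ===== PRECONDITION & SPEC =====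
def Spec_better_algo_x (A : List Int) (k : Int) (out : Option Int) : Prop := out = better_algo_x_alt A k
instance (A : List Int) (k : Int) (out : Option Int) : Decidable (Spec_better_algo_x A k out) := by unfold Spec_better_algo_x; infer_instance

-- ===== CLAIM (what is proved, stated in full; the proofs are below) =====
def Claim_equal_better_algo_x : Prop := ∀ (A : List Int) (k : Int), Dom_better_algo_x A k → Spec_better_algo_x A k (better_algo_x A k)

-- ===== LEMMAS AND PROOFS =====

-- a list whose elements are all equal is ≤-pairwise
theorem pairwise_le_of_all_eq (l : List Int) (p : Int) (h : ∀ x ∈ l, x = p) :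
    l.Pairwise (· ≤ ·) := by
  induction l with
  | nil => exact List.Pairwise.nil
  | cons a t ih =>
    refine List.Pairwise.cons ?_ (ih (fun x hx => h x (List.mem_cons_of_mem a hx)))
    intro b hb
    rw [h a (List.mem_cons_self), h b (List.mem_cons_of_mem a hb)]

-- sorting = sorting the strictly-smaller part ++ the copies of p ++ sorting the strictly-larger part
theorem sorted_partition (p : Int) (xs : List Int) :
    PySem.List.sorted xs (fun x => x) =
      PySem.List.sorted (xs.filter (fun v => decide (v < p))) (fun x => x)
      ++ xs.filter (fun v => v == p)
      ++ PySem.List.sorted (xs.filter (fun v => decide (p < v))) (fun x => x) := by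
  apply PySem.List.sorted_id_eq_of_perm_of_pairwise
  · rw [List.perm_iff_count]
    intro a
    have hL := (PySem.List.sorted_perm (xs.filter (fun v => decide (v < p))) (fun x => x) false).count_eq a
    have hG := (PySem.List.sorted_perm (xs.filter (fun v => decide (p < v))) (fun x => x) false).count_eq a
    have hz : ∀ (q : Int → Bool), q a = false → List.count a (xs.filter q) = 0 := by
      intro q hq
      refine List.count_eq_zero.mpr (fun h => ?_)
      have := (List.mem_filter.mp h).2; simp_all
    have ho : ∀ (q : Int → Bool), q a = true → List.count a (xs.filter q) = List.count a xs := by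
      intro q hq
      exact List.count_filter hq
    simp only [List.count_append, hL, hG]
    rcases lt_trichotomy a p with h | h | h
    · rw [ho _ (by simp [h]), hz (fun v => v == p) (by simp; omega), hz _ (by simp; omega)]; omega
    · rw [hz _ (by simp [h]), ho (fun v => v == p) (by simp [h]), hz _ (by simp [h])]; omega
    · rw [hz _ (by simp; omega), hz (fun v => v == p) (by simp; omega), ho _ (by simp [h])]; omega
  · have hmemL : ∀ a ∈ PySem.List.sorted (xs.filter (fun v => decide (v < p))) (fun x => x), a < p := by
      intro a ha
      have := (PySem.List.mem_sorted _ _ _ a).mp ha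
      simpa using (List.mem_filter.mp this).2
    have hmemE : ∀ a ∈ xs.filter (fun v => v == p), a = p := by
      intro a ha
      simpa using (List.mem_filter.mp ha).2
    have hmemG : ∀ a ∈ PySem.List.sorted (xs.filter (fun v => decide (p < v))) (fun x => x), p < a := by
      intro a ha
      have := (PySem.List.mem_sorted _ _ _ a).mp ha
      simpa using (List.mem_filter.mp this).2
    rw [List.pairwise_append, List.pairwise_append]
    refine ⟨⟨?_, ?_, ?_⟩, ?_, ?_⟩
    · simpa using PySem.List.sorted_pairwise (xs.filter (fun v => decide (v < p))) (fun x => x)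
    · exact pairwise_le_of_all_eq _ p hmemE
    · intro a ha b hb
      rw [hmemE b hb]; exact le_of_lt (hmemL a ha)
    · simpa using PySem.List.sorted_pairwise (xs.filter (fun v => decide (p < v))) (fun x => x)
    · intro a ha b hb
      rcases List.mem_append.mp ha with h | h
      · exact le_of_lt ((hmemL a h).trans (hmemG b hb))
      · rw [hmemE a h]; exact le_of_lt (hmemG b hb)

-- quickselect returns the k-th entry of the sorted list
theorem qselAlt_eq_aux : ∀ (n : Nat) (xs : List Int) (k : Nat), xs.length ≤ n → k < xs.length →
    qselAlt xs k = (PySem.List.sorted xs (fun x => x)).getD k 0 := by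
  intro n
  induction n with
  | zero => intro xs k h hk; omega
  | succ n ih =>
    intro xs k h hk
    match xs with
    | [] => simp at hk
    | p :: rest =>
      have hL := List.length_filter_le (fun v => decide (v < p)) rest
      have hG := List.length_filter_le (fun v => decide (p < v)) rest
      have hLc : ((p :: rest).filter (fun v => decide (v < p))).length ≤ rest.length := by
        simp [List.filter_cons]; omega
      have hGc : ((p :: rest).filter (fun v => decide (p < v))).length ≤ rest.length := by
        simp [List.filter_cons]; omega
      have hlen : (p :: rest).length =
          ((p :: rest).filter (fun v => decide (v < p))).length
          + ((p :: rest).filter (fun v => v == p)).length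
          + ((p :: rest).filter (fun v => decide (p < v))).length := by
        have h2 := congrArg List.length (sorted_partition p (p :: rest))
        simp only [PySem.List.length_sorted, List.length_append] at h2
        omega
      have h' : rest.length + 1 ≤ n + 1 := by simpa using h
      have hk' : k < rest.length + 1 := by simpa using hk
      rw [qselAlt, sorted_partition p (p :: rest)]
      simp only []
      split_ifs with h1 h2
      · rw [List.getD_append _ _ _ _ (by simp only [List.length_append, PySem.List.length_sorted]; omega),
            List.getD_append _ _ _ _ (by simp only [PySem.List.length_sorted]; omega)]
        exact ih _ k (by omega) h1
      · rw [List.getD_append _ _ _ _ (by simp only [List.length_append, PySem.List.length_sorted]; omega),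
            List.getD_append_right _ _ _ _ (by simp only [PySem.List.length_sorted]; omega)]
        simp only [PySem.List.length_sorted]
        have hidx : k - ((p :: rest).filter (fun v => decide (v < p))).length
            < ((p :: rest).filter (fun v => v == p)).length := by omega
        rw [List.getD_eq_getElem _ _ hidx]
        have hm := List.getElem_mem hidx
        have heq := (List.mem_filter.mp hm).2
        simp only [beq_iff_eq] at heq
        exact heq.symm
      · rw [List.getD_append_right _ _ _ _ (by simp only [List.length_append, PySem.List.length_sorted]; omega)]
        simp only [List.length_append, PySem.List.length_sorted]
        rw [ih _ _ (by omega) (by omega)]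
        congr 1
        omega

-- in a ≤-sorted list, an earlier duplicate of s[j] exists iff fewer than j elements are < s[j]
theorem sorted_dup_iff_count (s : List Int) (hs : s.Pairwise (· ≤ ·)) (j : Nat)
    (hj : j < s.length) :
    (∃ i, i < j ∧ s.getD i 0 = s.getD j 0) ↔
      (s.filter (fun v => decide (v < s.getD j 0))).length ≠ j := by
  have hx : s.getD j 0 = s[j] := List.getD_eq_getElem s 0 hj
  have htlen : (s.take j).length = j := by simp; omega
  have hle : ∀ v ∈ s.take j, v ≤ s[j] := by
    have hp : (s.take (j + 1)).Pairwise (· ≤ ·) := List.Pairwise.sublist (List.take_sublist _ _) hs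
    rw [List.take_succ] at hp
    have hget : s[j]? = some s[j] := List.getElem?_eq_getElem hj
    rw [hget] at hp
    intro v hv
    exact (List.pairwise_append.mp hp).2.2 v hv s[j] (by simp)
  have hge : ∀ v ∈ s.drop j, s[j] ≤ v := by
    have hp : (s.drop j).Pairwise (· ≤ ·) := List.Pairwise.sublist (List.drop_sublist _ _) hs
    rw [List.drop_eq_getElem_cons hj] at hp
    intro v hv
    rw [List.drop_eq_getElem_cons hj] at hv
    rcases List.mem_cons.mp hv with h | h
    · omega
    · exact (List.pairwise_cons.mp hp).1 v h
  have hsplit0 : ∀ (q : Int → Bool), (∀ v ∈ s.drop j, ¬ q v = true) →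
      (s.filter q).length = ((s.take j).filter q).length := by
    intro q hq
    conv_lhs => rw [← List.take_append_drop j s]
    rw [List.filter_append, List.length_append, List.filter_eq_nil_iff.mpr hq]
    simp
  have hsplit : (s.filter (fun v => decide (v < s.getD j 0))).length
      = ((s.take j).filter (fun v => decide (v < s.getD j 0))).length := by
    refine hsplit0 _ (fun v hv => ?_)
    have := hge v hv
    simp only [hx, decide_eq_true_eq, not_lt]
    omega
  constructor
  · rintro ⟨i, hij, heq⟩
    have hi : i < s.length := by omega
    have hmem : s.getD j 0 ∈ s.take j := by
      rw [← heq, List.getD_eq_getElem s 0 hi]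
      have : (s.take j)[i]'(by omega) = s[i] := List.getElem_take
      rw [← this]
      exact List.getElem_mem _
    have hlt : ((s.take j).filter (fun v => decide (v < s.getD j 0))).length < j := by
      have h2 : ((s.take j).filter (fun v => decide (v < s.getD j 0))).length
          < (s.take j).length := by
        refine List.length_filter_lt_length_iff_exists.mpr ⟨s.getD j 0, hmem, ?_⟩
        simp
      omega
    omega
  · intro hne
    have hlt : ((s.take j).filter (fun v => decide (v < s.getD j 0))).length < j := by
      have := List.length_filter_le (fun v => decide (v < s.getD j 0)) (s.take j)
      omega
    obtain ⟨v, hv, hnv⟩ := List.length_filter_lt_length_iff_exists.mp (by omega : ((s.take j).filter (fun v => decide (v < s.getD j 0))).length < (s.take j).length)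
    have hveq : v = s[j] := by
      have h1 := hle v hv
      simp only [decide_eq_true_eq, not_lt, hx] at hnv
      omega
    obtain ⟨i, hi, hti⟩ := List.mem_iff_getElem.mp hv
    refine ⟨i, by omega, ?_⟩
    rw [List.getD_eq_getElem s 0 (by omega : i < s.length), hx]
    rw [← hveq, ← hti]
    exact List.getElem_take.symm

-- the two ports agree on every input
theorem main_eq (A : List Int) (k : Int) : better_algo_x A k = better_algo_x_alt A k := by
  by_cases hc : k < 0 ∨ k ≥ (A.length : Int)
  · rw [better_algo_x, better_algo_x_alt]
    simp only [PySem.List.length_sorted]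
    rw [if_pos hc, if_pos hc]
  · push_neg at hc
    obtain ⟨h0, hk⟩ := hc
    have hj : k.toNat < A.length := by omega
    have hjk : (k.toNat : Int) = k := by omega
    have hsl : (PySem.List.sorted A (fun x => x) false).length = A.length :=
      PySem.List.length_sorted A _ false
    have hs : (PySem.List.sorted A (fun x => x) false).Pairwise (· ≤ ·) := by
      simpa using PySem.List.sorted_pairwise A (fun x => x)
    have hx : qselAlt A k.toNat
        = (PySem.List.sorted A (fun x => x) false).getD k.toNat 0 :=
      qselAlt_eq_aux A.length A k.toNat le_rfl hj
    have hcount : ∀ (q : Int → Bool),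
        (A.filter q).length = ((PySem.List.sorted A (fun x => x) false).filter q).length :=
      fun q => ((PySem.List.sorted_perm A (fun x => x) false).filter q).length_eq.symm
    have hiff := sorted_dup_iff_count (PySem.List.sorted A (fun x => x) false) hs k.toNat
      (by omega)
    have hpred : ∀ (i : Int), 0 ≤ i → i < k →
        ((PySem.List.pyGet? (PySem.List.sorted A (fun x => x) false) i
          == PySem.List.pyGet? (PySem.List.sorted A (fun x => x) false) k) = true ↔
          (PySem.List.sorted A (fun x => x) false).getD i.toNat 0
            = (PySem.List.sorted A (fun x => x) false).getD k.toNat 0) := by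
      intro i hi0 hik
      rw [PySem.List.pyGet?_of_nonneg _ hi0, PySem.List.pyGet?_of_nonneg _ h0]
      rw [List.getElem?_eq_getElem (by omega : i.toNat < (PySem.List.sorted A (fun x => x) false).length),
          List.getElem?_eq_getElem (by omega : k.toNat < (PySem.List.sorted A (fun x => x) false).length)]
      rw [List.getD_eq_getElem _ _ (by omega : i.toNat < (PySem.List.sorted A (fun x => x) false).length),
          List.getD_eq_getElem _ _ (by omega : k.toNat < (PySem.List.sorted A (fun x => x) false).length)]
      simp
    rw [better_algo_x, better_algo_x_alt]
    simp only [PySem.List.length_sorted]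
    rw [if_neg (by push_neg; exact ⟨h0, hk⟩), if_neg (by push_neg; exact ⟨h0, hk⟩)]
    cases hfind : (PySem.List.pyRange 0 k 1).find?
        (fun i => PySem.List.pyGet? (PySem.List.sorted A (fun x => x) false) i
          == PySem.List.pyGet? (PySem.List.sorted A (fun x => x) false) k) with
    | some w =>
      have hpw := List.find?_some hfind
      have hmw := List.mem_of_find?_eq_some hfind
      have hwr := PySem.List.mem_pyRange_one.mp hmw
      have hex : ∃ i, i < k.toNat ∧
          (PySem.List.sorted A (fun x => x) false).getD i 0
            = (PySem.List.sorted A (fun x => x) false).getD k.toNat 0 :=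
        ⟨w.toNat, by omega, (hpred w hwr.1 hwr.2).mp hpw⟩
      have hne := hiff.mp hex
      rw [if_neg]
      rw [hx, hcount]
      intro hcontra
      apply hne
      omega
    | none =>
      have hall := List.find?_eq_none.mp hfind
      have heq : ((A.filter (fun v => decide (v < qselAlt A k.toNat))).length : Int) = k := by
        rw [hx, hcount]
        have : ¬ ∃ i, i < k.toNat ∧
            (PySem.List.sorted A (fun x => x) false).getD i 0
              = (PySem.List.sorted A (fun x => x) false).getD k.toNat 0 := by
          rintro ⟨i, hij, hieq⟩
          exact hall (i : Int) (PySem.List.mem_pyRange_one.mpr ⟨by omega, by omega⟩)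
            ((hpred i (by omega) (by omega)).mpr (by simpa using hieq))
        have hcnt : ((PySem.List.sorted A (fun x => x) false).filter
            (fun v => decide (v < (PySem.List.sorted A (fun x => x) false).getD k.toNat 0))).length
            = k.toNat := by
          by_contra hne
          exact this (hiff.mpr hne)
        omega
      rw [if_pos heq]
      rw [PySem.List.pyGet?_of_nonneg _ h0,
          List.getElem?_eq_getElem (by omega : k.toNat < (PySem.List.sorted A (fun x => x) false).length)]
      rw [hx, List.getD_eq_getElem _ _ (by omega : k.toNat < (PySem.List.sorted A (fun x => x) false).length)]

-- ===== VERDICT (by name: the statement is the Claim_ definition above) =====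
theorem better_algo_x_spec : Claim_equal_better_algo_x := by
  intro A k _
  unfold Spec_better_algo_x
  exact main_eq A k
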